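-- pv_equiv track=rewrite | github.com/chargebee/.github | tools/analyze_github.py | is_incident_issue
-- ===== SOURCE A (Python) =====
-- from typing import Dict, Iterable, List, Optional, Tuple
--
-- def is_incident_issue(labels: List[Dict]) -> bool:
--     incident_markers = [
--         "incident",
--         "sev",
--         "severity",
--         "p0",
--         "p1",
--         "s1",
--         "s2",
--         "outage",
--         "hotfix",
--     ]
--     label_names = [lbl.get("name", "").lower() for lbl in labels or []]
--     return any(any(marker in name for marker in incident_markers) for name in label_names)
-- ===== SOURCE B (Python) =====
-- def _scan(name):
--     # one left-to-right pass: at each position dispatch on the first character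
--     # and test whether one of the (redundancy-free) incident markers starts here
--     n = len(name)
--     for i in range(n):
--         c = name[i]
--         if c == 'i':
--             if name.startswith("ncident", i + 1):
--                 return True
--         elif c == 's':
--             if name.startswith("ev", i + 1) or (i + 1 < n and name[i + 1] in "12"):
--                 return True
--         elif c == 'p':
--             if i + 1 < n and name[i + 1] in "01":
--                 return True
--         elif c == 'o':
--             if name.startswith("utage", i + 1):
--                 return True
--         elif c == 'h':
--             if name.startswith("otfix", i + 1):
--                 return True
--     return False
--
-- def is_incident_issue(labels):
--     for lbl in labels or []:
--         if _scan(lbl.get("name", "").lower()):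
--             return True
--     return False
-- ===== Notes on version B (the rewrite author's own statement) =====
-- stated objective: alternative
-- what changed: Instead of testing all nine markers as substrings of every name, B makes a single left-to-right pass over each lowercased name, dispatching on the current character and checking whether one of the eight non-redundant markers (severity is dropped since it contains sev) starts at that position.
import Mathlib
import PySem

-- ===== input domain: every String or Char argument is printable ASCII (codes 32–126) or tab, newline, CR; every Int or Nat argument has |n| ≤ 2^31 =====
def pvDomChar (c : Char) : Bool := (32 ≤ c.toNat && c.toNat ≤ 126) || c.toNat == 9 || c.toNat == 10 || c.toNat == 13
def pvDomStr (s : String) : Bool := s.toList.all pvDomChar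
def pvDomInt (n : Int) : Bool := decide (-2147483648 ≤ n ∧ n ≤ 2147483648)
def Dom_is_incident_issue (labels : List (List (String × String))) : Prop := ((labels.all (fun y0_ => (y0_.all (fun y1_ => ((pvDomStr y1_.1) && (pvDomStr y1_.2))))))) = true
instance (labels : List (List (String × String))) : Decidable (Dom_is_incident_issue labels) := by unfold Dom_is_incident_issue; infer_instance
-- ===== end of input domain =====

-- B replaces the nine-marker substring scan by one left-to-right pass per name that
-- dispatches on the current character and checks the non-redundant markers in place
-- (objective: alternative single-pass algorithm, same asymptotic cost).

-- ===== PORT A =====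
def is_incident_issue (labels : List (List (String × String))) : Bool :=
  let incident_markers : List String :=
    ["incident", "sev", "severity", "p0", "p1", "s1", "s2", "outage", "hotfix"]
  let label_names : List String :=
    labels.map (fun lbl => PySem.Str.lower ((PySem.Dict.mk lbl).getD "name" ""))
  label_names.any (fun name => incident_markers.any (fun marker => PySem.Str.isIn marker name))

-- ===== PORT B =====
-- the per-position dispatch of Source B's _scan loop body (c = name[i], cs = name[i+1:])
def pvHit (c : Char) (cs : List Char) : Bool :=
  if c = 'i' then ['n','c','i','d','e','n','t'].isPrefixOf cs
  else if c = 's' then ['e','v'].isPrefixOf cs || cs.head? == some '1' || cs.head? == some '2'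
  else if c = 'p' then cs.head? == some '0' || cs.head? == some '1'
  else if c = 'o' then ['u','t','a','g','e'].isPrefixOf cs
  else if c = 'h' then ['o','t','f','i','x'].isPrefixOf cs
  else false

-- Source B's _scan: the for-loop over positions with early return
def pvScan : List Char → Bool
  | [] => false
  | c :: cs => pvHit c cs || pvScan cs

def is_incident_issue_alt (labels : List (List (String × String))) : Bool :=
  labels.any (fun lbl =>
    pvScan (PySem.Chars.lower ((PySem.Dict.mk lbl).getD "name" "").toList))

-- ===== PRECONDITION & SPEC =====
def Spec_is_incident_issue (labels : List (List (String × String))) (out : Bool) : Prop := out = is_incident_issue_alt labels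
instance (labels : List (List (String × String))) (out : Bool) : Decidable (Spec_is_incident_issue labels out) := by unfold Spec_is_incident_issue; infer_instance

-- ===== CLAIM (what is proved, stated in full; the proofs are below) =====
def Claim_equal_is_incident_issue : Prop := ∀ (labels : List (List (String × String))), Dom_is_incident_issue labels → Spec_is_incident_issue labels (is_incident_issue labels)

-- ===== LEMMAS AND PROOFS =====

-- the eight non-redundant markers, as char lists
def pvMarkers : List (List Char) :=
  [['i','n','c','i','d','e','n','t'], ['s','e','v'], ['p','0'], ['p','1'],
   ['s','1'], ['s','2'], ['o','u','t','a','g','e'], ['h','o','t','f','i','x']]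

theorem pvHit_iff (c : Char) (cs : List Char) :
    pvHit c cs = true ↔ ∃ m ∈ pvMarkers, m <+: c :: cs := by
  simp only [pvMarkers, List.mem_cons, List.not_mem_nil, or_false, exists_eq_or_imp,
    exists_eq_left, List.cons_prefix_cons, pvHit]
  cases cs with
  | nil => split_ifs with h1 h2 h3 h4 h5 <;>
      simp_all [List.isPrefixOf, List.prefix_nil]
  | cons b bs =>
      split_ifs with h1 h2 h3 h4 h5 <;>
        simp_all [List.isPrefixOf_iff_prefix, List.cons_prefix_cons, eq_comm (b := c),
          eq_comm (b := b)]
      tauto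

theorem pvScan_iff (cs : List Char) :
    pvScan cs = true ↔ ∃ m ∈ pvMarkers, m <:+: cs := by
  induction cs with
  | nil => simp [pvScan, pvMarkers, List.infix_nil]
  | cons c cs ih =>
    simp only [pvScan, Bool.or_eq_true, ih, pvHit_iff, List.infix_cons_iff]
    constructor
    · rintro (⟨m, hm, hp⟩ | ⟨m, hm, hi⟩)
      · exact ⟨m, hm, Or.inl hp⟩
      · exact ⟨m, hm, Or.inr hi⟩
    · rintro ⟨m, hm, hp | hi⟩
      · exact Or.inl ⟨m, hm, hp⟩
      · exact Or.inr ⟨m, hm, hi⟩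

-- per-name core: A's nine substring tests equal B's single scan
theorem pvPerName (cs : List Char) :
    (["incident", "sev", "severity", "p0", "p1", "s1", "s2", "outage", "hotfix"].any
      (fun marker => PySem.Chars.isIn marker.toList cs)) = pvScan cs := by
  rw [Bool.eq_iff_iff]
  simp only [List.any_eq_true, PySem.Chars.isIn_iff_infix, pvScan_iff, pvMarkers]
  simp only [List.mem_cons, List.not_mem_nil, or_false, exists_eq_or_imp, exists_eq_left]
  constructor
  · rintro (h | h | h | h | h | h | h | h | h)
    · exact Or.inl h
    · exact Or.inr (Or.inl h)
    · -- "severity" contains "sev"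
      exact Or.inr (Or.inl ((show "sev".toList <+: "severity".toList by decide).isInfix.trans h))
    · exact Or.inr (Or.inr (Or.inl h))
    · exact Or.inr (Or.inr (Or.inr (Or.inl h)))
    · exact Or.inr (Or.inr (Or.inr (Or.inr (Or.inl h))))
    · exact Or.inr (Or.inr (Or.inr (Or.inr (Or.inr (Or.inl h)))))
    · exact Or.inr (Or.inr (Or.inr (Or.inr (Or.inr (Or.inr (Or.inl h))))))
    · exact Or.inr (Or.inr (Or.inr (Or.inr (Or.inr (Or.inr (Or.inr h))))))
  · rintro (h | h | h | h | h | h | h | h)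
    · exact Or.inl h
    · exact Or.inr (Or.inl h)
    · exact Or.inr (Or.inr (Or.inr (Or.inl h)))
    · exact Or.inr (Or.inr (Or.inr (Or.inr (Or.inl h))))
    · exact Or.inr (Or.inr (Or.inr (Or.inr (Or.inr (Or.inl h)))))
    · exact Or.inr (Or.inr (Or.inr (Or.inr (Or.inr (Or.inr (Or.inl h))))))
    · exact Or.inr (Or.inr (Or.inr (Or.inr (Or.inr (Or.inr (Or.inr (Or.inl h)))))))
    · exact Or.inr (Or.inr (Or.inr (Or.inr (Or.inr (Or.inr (Or.inr (Or.inr h)))))))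

-- ===== VERDICT (by name: the statement is the Claim_ definition above) =====
theorem is_incident_issue_spec : Claim_equal_is_incident_issue := by
  intro labels _
  unfold Spec_is_incident_issue is_incident_issue is_incident_issue_alt
  simp only [List.any_map]
  refine List.any_congr rfl ?_
  intro lbl
  rw [← pvPerName]
  simp
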